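-- pv_equiv track=rewrite | github.com/ARaZoAnna/algorithm | PGS/Level1/모의고사.py | solution
-- ===== SOURCE A (Python) =====
-- def solution(answers):
--     answer = []
--
--     a = [1,2,3,4,5]
--     b = [2,1,2,3,2,4,2,5]
--     c = [3,3,1,1,2,2,4,4,5,5]
--
--     score = [0] * 3
--
--     for idx in range(len(answers)) :
--         if answers[idx] == a[idx%len(a)] :
--             score[0] += 1
--         if answers[idx] == b[idx%len(b)] :
--             score[1] += 1
--         if answers[idx] == c[idx%len(c)] :
--             score[2] += 1
--
--     for idx, ans in enumerate(score) :
--         if ans == max(score) :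
--             answer.append(idx+1)
--
--     return answer
-- ===== SOURCE B (Python) =====
-- def solution(answers):
--     # Hash-index algorithm: one pass builds a frequency table of (position mod 40,
--     # answer) pairs (40 = lcm of the three pattern lengths); each pattern's score is
--     # then the sum of 40 table lookups, so no per-element pattern comparison happens.
--     PERIOD = 40
--     patterns = [[1, 2, 3, 4, 5],
--                 [2, 1, 2, 3, 2, 4, 2, 5],
--                 [3, 3, 1, 1, 2, 2, 4, 4, 5, 5]]
--     freq = {}
--     for i, ans in enumerate(answers):
--         key = (i % PERIOD, ans)
--         freq[key] = freq.get(key, 0) + 1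
--     scores = [sum(freq.get((off, pat[off % len(pat)]), 0) for off in range(PERIOD))
--               for pat in patterns]
--     best = max(scores)
--     return [p + 1 for p, s in enumerate(scores) if s == best]
-- ===== Notes on version B (the rewrite author's own statement) =====
-- stated objective: alternative
-- what changed: Replaces A's fused per-element comparison against the three cyclic patterns by a hash-index algorithm: one pass builds a frequency dict keyed by (index mod 40, answer) (40 = lcm of the pattern lengths), and each pattern's score is then the sum of 40 dict lookups, with no per-element pattern comparison.
import Mathlib
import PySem

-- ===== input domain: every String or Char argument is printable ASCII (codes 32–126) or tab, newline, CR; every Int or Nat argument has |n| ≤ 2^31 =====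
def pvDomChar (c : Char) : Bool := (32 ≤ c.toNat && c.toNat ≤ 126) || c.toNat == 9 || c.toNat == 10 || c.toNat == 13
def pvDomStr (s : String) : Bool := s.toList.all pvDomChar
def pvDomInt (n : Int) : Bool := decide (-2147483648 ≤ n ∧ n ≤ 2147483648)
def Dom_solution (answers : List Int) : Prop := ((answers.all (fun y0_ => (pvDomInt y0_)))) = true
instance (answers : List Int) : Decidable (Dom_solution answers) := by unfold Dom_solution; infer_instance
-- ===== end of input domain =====

-- B replaces A's fused per-element pattern comparison by a hash index: one pass builds a
-- frequency dict of (index mod 40, answer) pairs, then each score is a sum of 40 lookups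
-- (objective: alternative).


-- ===== PORT A =====
-- the three mutable cells of Python's 'score' list are carried as an Int × Int × Int state
def solution (answers : List Int) : List Int :=
  let a : List Int := [1,2,3,4,5]
  let b : List Int := [2,1,2,3,2,4,2,5]
  let c : List Int := [3,3,1,1,2,2,4,4,5,5]
  let score : Int × Int × Int :=
    (PySem.List.pyRange 0 answers.length 1).foldl (fun s idx =>
      (if PySem.List.pyGetD answers idx 0 == PySem.List.pyGetD a (PySem.Int.mod idx (a.length : Int)) 0 then s.1 + 1 else s.1,
       if PySem.List.pyGetD answers idx 0 == PySem.List.pyGetD b (PySem.Int.mod idx (b.length : Int)) 0 then s.2.1 + 1 else s.2.1,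
       if PySem.List.pyGetD answers idx 0 == PySem.List.pyGetD c (PySem.Int.mod idx (c.length : Int)) 0 then s.2.2 + 1 else s.2.2))
      (0, 0, 0)
  let scoreL : List Int := [score.1, score.2.1, score.2.2]
  (PySem.List.enumerate scoreL 0).foldl (fun answer p =>
    if p.2 == (PySem.List.max? scoreL (fun x => x)).getD 0 then answer ++ [p.1 + 1] else answer) []

-- ===== PORT B =====
-- 'key = (i % PERIOD, ans)' of Source B (PERIOD = 40)
def pvKey (p : Int × Int) : Int × Int := (PySem.Int.mod p.1 40, p.2)

-- one step of Source B's dict-building loop: freq[key] = freq.get(key, 0) + 1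
def pvStep (d : PySem.Dict (Int × Int) Int) (p : Int × Int) : PySem.Dict (Int × Int) Int :=
  d.insert (pvKey p) (d.getD (pvKey p) 0 + 1)

-- Source B's frequency table: one pass over enumerate(answers)
def pvFreq (answers : List Int) : PySem.Dict (Int × Int) Int :=
  (PySem.List.enumerate answers 0).foldl pvStep PySem.Dict.empty

-- sum(freq.get((off, pat[off % len(pat)]), 0) for off in range(PERIOD))
def pvPatScore (freq : PySem.Dict (Int × Int) Int) (pat : List Int) : Int :=
  (PySem.List.pyRange 0 40 1).foldl
    (fun acc off => acc + freq.getD (off, PySem.List.pyGetD pat (PySem.Int.mod off (pat.length : Int)) 0) 0) 0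

def solution_alt (answers : List Int) : List Int :=
  let patterns : List (List Int) := [[1,2,3,4,5], [2,1,2,3,2,4,2,5], [3,3,1,1,2,2,4,4,5,5]]
  let freq := pvFreq answers
  let scores : List Int := patterns.map (fun pat => pvPatScore freq pat)
  let best : Int := (PySem.List.max? scores (fun x => x)).getD 0
  (PySem.List.enumerate scores 0).foldl
    (fun out p => if p.2 == best then out ++ [p.1 + 1] else out) []

-- ===== PRECONDITION & SPEC =====
def Spec_solution (answers : List Int) (out : List Int) : Prop := out = solution_alt answers
instance (answers : List Int) (out : List Int) : Decidable (Spec_solution answers out) := by unfold Spec_solution; infer_instance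

-- ===== CLAIM (what is proved, stated in full; the proofs are below) =====
def Claim_equal_solution : Prop := ∀ (answers : List Int), Dom_solution answers → Spec_solution answers (solution answers)

-- ===== LEMMAS AND PROOFS =====

-- lookup in the keyed counter fold is the count of that key among the mapped keys
theorem getD_foldl_pvStep (l : List (Int × Int)) (d : PySem.Dict (Int × Int) Int) (k : Int × Int) :
    (l.foldl pvStep d).getD k 0 = d.getD k 0 + (((l.map pvKey).count k : Nat) : Int) := by
  induction l generalizing d with
  | nil => simp
  | cons q t ih =>
    rw [List.foldl_cons, ih (pvStep d q), List.map_cons, List.count_cons]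
    unfold pvStep
    rw [PySem.Dict.getD_insert]
    by_cases h : k = pvKey q
    · subst h
      rw [if_pos rfl, beq_self_eq_true (pvKey q), if_pos rfl]
      push_cast
      ring
    · have hb : (pvKey q == k) = false := by
        simp only [beq_eq_false_iff_ne, ne_eq]
        exact fun he => h he.symm
      rw [if_neg h, hb]
      push_cast
      ring

theorem getD_pvFreq (answers : List Int) (k : Int × Int) :
    (pvFreq answers).getD k 0 = ((((PySem.List.enumerate answers 0).map pvKey).count k : Nat) : Int) := by
  unfold pvFreq
  rw [getD_foldl_pvStep]
  simp [PySem.Dict.empty, PySem.Dict.getD, PySem.Dict.get?]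

-- when j occurs exactly once in the nodup list R, the indicator sum over R collapses
theorem sum_indicator_nodup (R : List Int) (hR : R.Nodup) (j v : Int) (f : Int → Int)
    (hj : j ∈ R) :
    (R.map (fun off => if (j, v) = (off, f off) then (1 : Int) else 0)).sum
      = if v = f j then 1 else 0 := by
  induction R with
  | nil => cases hj
  | cons r t ih =>
    rcases List.nodup_cons.mp hR with ⟨hrt, ht⟩
    rcases List.mem_cons.mp hj with h | h
    · subst h
      have hz : (List.map (fun off => if (j, v) = (off, f off) then (1 : Int) else 0) t).sum = 0 := by
        apply List.sum_eq_zero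
        intro x hx
        rcases List.mem_map.mp hx with ⟨off, hofft, hoff⟩
        have hne : ¬ ((j, v) : Int × Int) = (off, f off) := by
          intro he
          injection he with h1 h2
          exact hrt (h1 ▸ hofft)
        rw [← hoff, if_neg hne]
      rw [List.map_cons, List.sum_cons, hz, add_zero]
      by_cases hv : v = f j
      · rw [if_pos (by rw [hv]), if_pos hv]
      · rw [if_neg (fun he => hv (by injection he)), if_neg hv]
    · have hjr : j ≠ r := fun he => hrt (he ▸ h)
      have hne : ¬ ((j, v) : Int × Int) = (r, f r) := by
        intro he; injection he with h1 _; exact hjr h1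
      rw [List.map_cons, List.sum_cons, if_neg hne, ih ht h, zero_add]

-- summing per-key counts over a nodup list covering all first components is a countP
theorem sum_count_eq_countP (R : List Int) (hR : R.Nodup) (f : Int → Int)
    (l : List (Int × Int)) (hl : ∀ p ∈ l, p.1 ∈ R) :
    (R.map (fun off => ((l.count (off, f off) : Nat) : Int))).sum
      = ((l.countP (fun p => p.2 == f p.1) : Nat) : Int) := by
  induction l with
  | nil => simp
  | cons q t ih =>
    have hq : q.1 ∈ R := hl q (List.mem_cons_self ..)
    have ht : ∀ p ∈ t, p.1 ∈ R := fun p hp => hl p (List.mem_cons_of_mem _ hp)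
    have hsplit :
        (R.map (fun off => ((List.count (off, f off) (q :: t) : Nat) : Int))).sum
          = (R.map (fun off => ((t.count (off, f off) : Nat) : Int))).sum
            + (R.map (fun off => if (q.1, q.2) = (off, f off) then (1 : Int) else 0)).sum := by
      rw [← List.sum_map_add]
      apply congrArg List.sum
      apply List.map_congr_left
      intro off _
      rcases q with ⟨j, v⟩
      by_cases h : ((j, v) : Int × Int) = (off, f off) <;> simp [h]
    rw [hsplit, ih ht, sum_indicator_nodup R hR q.1 q.2 f hq]
    rcases q with ⟨j, v⟩
    by_cases h : v = f j <;> simp [h]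

-- the period 40 absorbs each pattern length: (i % 40) % len = i % len
theorem mod_mod_40 (len : Int) (hpos : 0 < len) (hdvd : len ∣ 40) (i : Int) :
    PySem.Int.mod (PySem.Int.mod i 40) len = PySem.Int.mod i len := by
  rw [PySem.Int.mod_eq_emod_of_pos hpos, PySem.Int.mod_eq_emod_of_pos hpos,
      PySem.Int.mod_eq_emod_of_pos (show (0:Int) < 40 by norm_num)]
  exact Int.emod_emod_of_dvd i hdvd

-- B's dict-lookup sum for one pattern equals A's direct match count
theorem pattern_score_eq (answers pat : List Int) (hpos : 0 < (pat.length : Int))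
    (hdvd : (pat.length : Int) ∣ 40) :
    pvPatScore (pvFreq answers) pat
    = (PySem.List.pyRange 0 answers.length 1).foldl
        (fun s idx =>
          if PySem.List.pyGetD answers idx 0
              == PySem.List.pyGetD pat (PySem.Int.mod idx (pat.length : Int)) 0
            then s + 1 else s) 0 := by
  unfold pvPatScore
  rw [PySem.List.foldl_add (g := fun off =>
      (pvFreq answers).getD (off, PySem.List.pyGetD pat (PySem.Int.mod off (pat.length : Int)) 0) 0)]
  rw [List.map_congr_left (fun off _ => getD_pvFreq answers
        (off, PySem.List.pyGetD pat (PySem.Int.mod off (pat.length : Int)) 0))]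
  have hRnodup : (PySem.List.pyRange 0 40 1).Nodup := by decide
  have hmem : ∀ p ∈ (PySem.List.enumerate answers 0).map pvKey, p.1 ∈ PySem.List.pyRange 0 40 1 := by
    intro p hp
    rcases List.mem_map.mp hp with ⟨q, _, hq⟩
    have h0 : (0:Int) < 40 := by norm_num
    have := PySem.Int.mod_nonneg q.1 h0
    have := PySem.Int.mod_lt q.1 h0
    rw [← hq]
    unfold pvKey
    simp only [PySem.List.mem_pyRange_one]
    omega
  rw [sum_count_eq_countP _ hRnodup
        (fun off => PySem.List.pyGetD pat (PySem.Int.mod off (pat.length : Int)) 0)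
        _ hmem]
  rw [PySem.List.foldl_if_add_one (p := fun idx =>
        PySem.List.pyGetD answers idx 0
          == PySem.List.pyGetD pat (PySem.Int.mod idx (pat.length : Int)) 0)]
  rw [List.countP_map, PySem.List.enumerate_eq_map_pyRange (d := 0), List.countP_map]
  simp only [zero_add]
  congr 1
  apply List.countP_congr
  intro idx _
  simp only [Function.comp_apply]
  unfold pvKey
  simp only [mod_mod_40 (pat.length : Int) hpos hdvd idx]

-- ===== VERDICT (by name: the statement is the Claim_ definition above) =====
theorem solution_spec : Claim_equal_solution := by
  intro answers _
  show solution answers = solution_alt answers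
  unfold solution solution_alt
  simp only []
  rw [PySem.List.foldl_prod_mk
        (f := fun s idx =>
          if PySem.List.pyGetD answers idx 0
              == PySem.List.pyGetD ([1,2,3,4,5] : List Int)
                  (PySem.Int.mod idx (([1,2,3,4,5] : List Int).length : Int)) 0
            then s + 1 else s)
        (g := fun s idx =>
          (if PySem.List.pyGetD answers idx 0
              == PySem.List.pyGetD ([2,1,2,3,2,4,2,5] : List Int)
                  (PySem.Int.mod idx (([2,1,2,3,2,4,2,5] : List Int).length : Int)) 0
            then s.1 + 1 else s.1,
           if PySem.List.pyGetD answers idx 0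
              == PySem.List.pyGetD ([3,3,1,1,2,2,4,4,5,5] : List Int)
                  (PySem.Int.mod idx (([3,3,1,1,2,2,4,4,5,5] : List Int).length : Int)) 0
            then s.2 + 1 else s.2)),
      PySem.List.foldl_prod_mk
        (f := fun s idx =>
          if PySem.List.pyGetD answers idx 0
              == PySem.List.pyGetD ([2,1,2,3,2,4,2,5] : List Int)
                  (PySem.Int.mod idx (([2,1,2,3,2,4,2,5] : List Int).length : Int)) 0
            then s + 1 else s)
        (g := fun s idx =>
          if PySem.List.pyGetD answers idx 0
              == PySem.List.pyGetD ([3,3,1,1,2,2,4,4,5,5] : List Int)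
                  (PySem.Int.mod idx (([3,3,1,1,2,2,4,4,5,5] : List Int).length : Int)) 0
            then s + 1 else s)]
  simp only [List.map_cons, List.map_nil]
  simp only [pattern_score_eq answers [1,2,3,4,5] (by decide) (by decide),
      pattern_score_eq answers [2,1,2,3,2,4,2,5] (by decide) (by decide),
      pattern_score_eq answers [3,3,1,1,2,2,4,4,5,5] (by decide) (by decide)]
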